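-- pv_equiv track=rewrite | github.com/Nandor-Waxmann/RoboCar | GetDirections.py | process_directions
-- ===== SOURCE A (Python) =====
-- def get_relative_direction(current_facing, new_direction):
--     # Directions mapped to integers
--     directions = ['UP', 'RIGHT', 'DOWN', 'LEFT']
--
--     # Get indices of current facing and new direction
--     current_index = directions.index(current_facing)
--     new_index = directions.index(new_direction)
--
--     # Calculate the difference in direction (clockwise)
--     diff = (new_index - current_index) % 4
--
--     # Based on the difference, return the first person move
--     if diff == 0:
--         return "MOVE FORWARD"
--     elif diff == 1:
--         return "MOVE RIGHT"
--     elif diff == 2: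
--         return "MOVE BACKWARD"
--     elif diff == 3:
--         return "MOVE LEFT"
--
-- def process_directions(starting_facing, directions):
--     current_facing = starting_facing
--     results = []
--
--     for direction in directions:
--         first_person_move = get_relative_direction(current_facing, direction)
--         results.append(first_person_move)
--         current_facing = direction  # Update the current facing to the new direction
--
--     return results
-- ===== SOURCE B (Python) =====
-- # Simulates clockwise quarter-turns: rotate the facing via a successor map
-- # until it matches the target direction, counting turns; the turn count picks
-- # the move and the rotation itself leaves the facing updated.
-- _RIGHT_OF = {'UP': 'RIGHT', 'RIGHT': 'DOWN', 'DOWN': 'LEFT', 'LEFT': 'UP'}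
-- _MOVES = ["MOVE FORWARD", "MOVE RIGHT", "MOVE BACKWARD", "MOVE LEFT"]
--
-- def process_directions(starting_facing, directions):
--     facing = starting_facing
--     results = []
--     for direction in directions:
--         turns = 0
--         while facing != direction:
--             facing = _RIGHT_OF[facing]
--             turns += 1
--             if turns == 4:
--                 raise ValueError(f"{direction!r} is not a direction")
--         results.append(_MOVES[turns])
--         # facing already equals direction after the rotation
--     return results
-- ===== Notes on version B (the rewrite author's own statement) =====
-- stated objective: alternative
-- what changed: Replaces the per-element index-difference mod-4 arithmetic and if-chain by simulating clockwise quarter-turns: an inner loop rotates the facing through a successor map until it matches the target, the turn count selects the move, and the facing update falls out of the rotation itself.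
import Mathlib
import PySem

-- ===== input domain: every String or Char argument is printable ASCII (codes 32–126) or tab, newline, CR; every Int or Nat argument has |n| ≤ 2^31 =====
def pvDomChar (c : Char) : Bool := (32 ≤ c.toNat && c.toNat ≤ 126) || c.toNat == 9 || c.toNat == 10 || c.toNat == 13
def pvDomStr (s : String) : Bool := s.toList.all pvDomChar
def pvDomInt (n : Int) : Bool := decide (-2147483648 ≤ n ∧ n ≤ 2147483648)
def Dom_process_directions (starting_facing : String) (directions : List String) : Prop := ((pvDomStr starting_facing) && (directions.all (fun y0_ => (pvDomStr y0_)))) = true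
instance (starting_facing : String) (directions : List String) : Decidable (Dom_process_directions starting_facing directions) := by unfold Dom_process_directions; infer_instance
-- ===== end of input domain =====

-- ===== PORT A =====
-- B simulates clockwise quarter-turns (rotate the facing via a successor map
-- until it matches the target, counting turns) instead of A's index-difference
-- mod-4 arithmetic; same return value on Pre_ (objective: alternative).
def get_relative_direction (current_facing : String) (new_direction : String) : Option String :=
  let directions : List String := ["UP", "RIGHT", "DOWN", "LEFT"]
  match PySem.List.index? directions current_facing, PySem.List.index? directions new_direction with
  | some current_index, some new_index =>
    let diff := PySem.Int.mod ((new_index : Int) - (current_index : Int)) 4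
    if diff = 0 then some "MOVE FORWARD"
    else if diff = 1 then some "MOVE RIGHT"
    else if diff = 2 then some "MOVE BACKWARD"
    else if diff = 3 then some "MOVE LEFT"
    else none
  | _, _ => none  -- .index raised ValueError (excluded by Pre_)

def process_directions (starting_facing : String) (directions : List String) : List String :=
  (directions.foldl (fun (st : String × List String) direction =>
      let first_person_move := (get_relative_direction st.1 direction).getD ""
      (direction, st.2 ++ [first_person_move]))
    (starting_facing, [])).2

-- ===== PORT B =====
def pvRightOf : PySem.Dict String String :=
  PySem.Dict.ofList [("UP", "RIGHT"), ("RIGHT", "DOWN"), ("DOWN", "LEFT"), ("LEFT", "UP")]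

def pvMoves : List String := ["MOVE FORWARD", "MOVE RIGHT", "MOVE BACKWARD", "MOVE LEFT"]

-- Source B's inner while loop: rotate `facing` clockwise until it equals `direction`,
-- counting turns; none = KeyError / ValueError (raised at turns == 4), excluded by Pre_.
def pvSpin (fuel : Nat) (facing direction : String) (turns : Nat) : Option (String × Nat) :=
  if facing = direction then some (facing, turns)
  else match fuel with
    | 0 => none
    | fuel + 1 =>
      match pvRightOf.get? facing with
      | none => none  -- KeyError
      | some f' => if turns + 1 = 4 then none  -- ValueError
                   else pvSpin fuel f' direction (turns + 1)

def process_directions_alt (starting_facing : String) (directions : List String) : List String :=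
  (directions.foldl (fun (st : String × List String) direction =>
      match pvSpin 4 st.1 direction 0 with
      | some (facing', turns) => (facing', st.2 ++ [pvMoves.getD turns ""])
      | none => (st.1, st.2 ++ [""]))  -- unreachable inside Pre_
    (starting_facing, [])).2

-- ===== PRECONDITION & SPEC =====
-- Pre_ excludes exactly the inputs on which A raises ValueError (a facing or
-- direction outside the four compass strings); B raises KeyError/ValueError there.
def Pre_process_directions (starting_facing : String) (directions : List String) : Prop :=
  (∀ d ∈ directions, d ∈ (["UP", "RIGHT", "DOWN", "LEFT"] : List String)) ∧
  (directions = [] ∨ starting_facing ∈ (["UP", "RIGHT", "DOWN", "LEFT"] : List String))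
instance (starting_facing : String) (directions : List String) : Decidable (Pre_process_directions starting_facing directions) := by unfold Pre_process_directions; infer_instance

def pvWitness_process_directions : String × List String := ("RIGHT", ["UP", "UP", "LEFT", "DOWN"])

def Spec_process_directions (starting_facing : String) (directions : List String) (out : List String) : Prop := out = process_directions_alt starting_facing directions
instance (starting_facing : String) (directions : List String) (out : List String) : Decidable (Spec_process_directions starting_facing directions out) := by unfold Spec_process_directions; infer_instance

-- ===== CLAIM (what is proved, stated in full; the proofs are below) =====
def Claim_equal_process_directions : Prop := ∀ (starting_facing : String) (directions : List String), Dom_process_directions starting_facing directions → Pre_process_directions starting_facing directions → Spec_process_directions starting_facing directions (process_directions starting_facing directions)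

-- ===== LEMMAS AND PROOFS =====

-- A's foldl with a non-empty result accumulator factors the accumulator out.
theorem pvFoldl_accA (directions : List String) (sf : String) (acc : List String) :
    (directions.foldl (fun (st : String × List String) direction =>
        ((direction, st.2 ++ [(get_relative_direction st.1 direction).getD ""]) : String × List String))
      (sf, acc)).2
    = acc ++ (directions.foldl (fun (st : String × List String) direction =>
        ((direction, st.2 ++ [(get_relative_direction st.1 direction).getD ""]) : String × List String))
      (sf, [])).2 := by
  induction directions generalizing sf acc with
  | nil => simp
  | cons d rest ih =>
    simp only [List.foldl_cons]
    rw [ih d (acc ++ _), ih d ([] ++ _)]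
    simp

-- B's foldl with a non-empty result accumulator factors the accumulator out.
theorem pvFoldl_accB (directions : List String) (sf : String) (acc : List String) :
    (directions.foldl (fun (st : String × List String) direction =>
        (match pvSpin 4 st.1 direction 0 with
         | some (facing', turns) => ((facing', st.2 ++ [pvMoves.getD turns ""]) : String × List String)
         | none => (st.1, st.2 ++ [""])))
      (sf, acc)).2
    = acc ++ (directions.foldl (fun (st : String × List String) direction =>
        (match pvSpin 4 st.1 direction 0 with
         | some (facing', turns) => ((facing', st.2 ++ [pvMoves.getD turns ""]) : String × List String)
         | none => (st.1, st.2 ++ [""])))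
      (sf, [])).2 := by
  induction directions generalizing sf acc with
  | nil => simp
  | cons d rest ih =>
    simp only [List.foldl_cons]
    rcases h : pvSpin 4 sf d 0 with _ | ⟨f', t⟩ <;> simp only [h] <;>
      rw [ih] <;> (conv_rhs => rw [ih]) <;> simp

-- On any of the 16 valid (facing, direction) pairs: B's spin ends facing the
-- target and its move equals A's per-step move.
theorem pvStep_eq (f d : String)
    (hf : f ∈ (["UP", "RIGHT", "DOWN", "LEFT"] : List String))
    (hd : d ∈ (["UP", "RIGHT", "DOWN", "LEFT"] : List String)) :
    ∃ t, pvSpin 4 f d 0 = some (d, t) ∧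
      pvMoves.getD t "" = (get_relative_direction f d).getD "" := by
  fin_cases hf <;> fin_cases hd <;> exact ⟨_, rfl, by decide⟩

theorem process_directions_eq_alt (starting_facing : String) (directions : List String)
    (hs : starting_facing ∈ (["UP", "RIGHT", "DOWN", "LEFT"] : List String))
    (hd : ∀ d ∈ directions, d ∈ (["UP", "RIGHT", "DOWN", "LEFT"] : List String)) :
    process_directions starting_facing directions = process_directions_alt starting_facing directions := by
  induction directions generalizing starting_facing with
  | nil => rfl
  | cons d rest ih =>
    unfold process_directions process_directions_alt
    simp only [List.foldl_cons]
    obtain ⟨t, hspin, hmove⟩ := pvStep_eq starting_facing d hs (hd d (by simp))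
    rw [pvFoldl_accA, pvFoldl_accB]
    have h2 := ih d (hd d (by simp)) (fun x hx => hd x (by simp [hx]))
    unfold process_directions process_directions_alt at h2
    simp only [hspin, hmove.symm]
    simp only [h2]

-- ===== VERDICT (by name: the statement is the Claim_ definition above) =====
theorem process_directions_spec : Claim_equal_process_directions := by
  intro sf ds _ hpre
  cases ds with
  | nil => rfl
  | cons d rest =>
    exact process_directions_eq_alt sf (d :: rest)
      (hpre.2.resolve_left (by simp)) hpre.1
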